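-- pv_equiv track=rewrite | github.com/YimiAChack/GSKN | gckn/data.py | random_to_anonymous_walk
-- ===== SOURCE A (Python) =====
-- def random_to_anonymous_walk(random_walk_seq):
--     cnt = 0
--     node_cnt = dict()
--     anonymous_walk_seq = []
--     for node in random_walk_seq:
--         if node not in node_cnt:
--             node_cnt[node] = cnt
--             cnt += 1
--         anonymous_walk_seq.append(node_cnt[node])
--
--     anonymous_walk_seq = [int(node) for node in anonymous_walk_seq]
--     return anonymous_walk_seq
-- ===== SOURCE B (Python) =====
-- def random_to_anonymous_walk(random_walk_seq):
--     seq = random_walk_seq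
--     return [len(set(seq[:seq.index(x)])) for x in seq]
-- ===== Notes on version B (the rewrite author's own statement) =====
-- stated objective: alternative
-- what changed: B drops A's incremental counter dict entirely: each element's anonymous id is recomputed independently as the number of distinct nodes strictly before its first occurrence (len(set(seq[:seq.index(x)]))), a branch-free quadratic pass with no mutable state; it trades A's O(n) dict algorithm for a stateless per-element computation.
import Mathlib
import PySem

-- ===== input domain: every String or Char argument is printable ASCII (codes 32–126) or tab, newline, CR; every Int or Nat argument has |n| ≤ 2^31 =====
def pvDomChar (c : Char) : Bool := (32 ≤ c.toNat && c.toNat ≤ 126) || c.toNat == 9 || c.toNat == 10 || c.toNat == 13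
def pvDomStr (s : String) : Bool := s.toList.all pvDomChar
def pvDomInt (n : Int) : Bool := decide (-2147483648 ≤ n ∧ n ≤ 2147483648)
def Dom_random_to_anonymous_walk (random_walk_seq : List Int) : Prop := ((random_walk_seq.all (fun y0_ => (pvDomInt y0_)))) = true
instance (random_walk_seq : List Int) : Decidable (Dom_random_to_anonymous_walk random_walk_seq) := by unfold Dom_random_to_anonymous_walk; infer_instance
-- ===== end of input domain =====

-- B drops A's incremental counter dict: each element's id is recomputed independently as the
-- number of distinct nodes before its first occurrence (stateless quadratic pass, no dict).


-- ===== PORT A =====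
-- the loop body of A: (cnt, node_cnt, anonymous_walk_seq); 'node_cnt[node]' after the conditional
-- insert always hits, so Dict.getD with an arbitrary default 0 is exact
def stepA (st : Int × PySem.Dict Int Int × List Int) (node : Int) :
    Int × PySem.Dict Int Int × List Int :=
  let p := if st.2.1.contains node then (st.1, st.2.1)
           else (st.1 + 1, (st.2.1).insert node st.1)
  (p.1, p.2, st.2.2 ++ [PySem.Dict.getD p.2 node 0])

def random_to_anonymous_walk (random_walk_seq : List Int) : List Int :=
  let st := random_walk_seq.foldl stepA (0, PySem.Dict.empty, [])
  -- final pass: [int(node) for node in anonymous_walk_seq]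
  st.2.2.map (fun node => node)

-- ===== PORT B =====
def random_to_anonymous_walk_alt (random_walk_seq : List Int) : List Int :=
  let seq := random_walk_seq
  -- 'seq.index(x)' never raises here (x is drawn from seq), so the none branch is unreachable
  seq.map (fun x =>
    match PySem.List.index? seq x with
    | some j => ((PySem.Set.ofList (PySem.List.slice seq none (some (j : Int)))).length : Int)
    | none => 0)

-- ===== PRECONDITION & SPEC =====
def Spec_random_to_anonymous_walk (random_walk_seq : List Int) (out : List Int) : Prop := out = random_to_anonymous_walk_alt random_walk_seq
instance (random_walk_seq : List Int) (out : List Int) : Decidable (Spec_random_to_anonymous_walk random_walk_seq out) := by unfold Spec_random_to_anonymous_walk; infer_instance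

-- ===== CLAIM (what is proved, stated in full; the proofs are below) =====
def Claim_equal_random_to_anonymous_walk : Prop := ∀ (random_walk_seq : List Int), Dom_random_to_anonymous_walk random_walk_seq → Spec_random_to_anonymous_walk random_walk_seq (random_to_anonymous_walk random_walk_seq)

-- ===== LEMMAS AND PROOFS =====

-- first-occurrence index in a list (total; callers only use it under membership)
def pvIdx : List Int → Int → Nat
  | [], _ => 0
  | y :: t, x => if y = x then 0 else pvIdx t x + 1

-- the index table A builds for a given order list
def dictOf (pre : List Int) : PySem.Dict Int Int :=
  (PySem.List.enumerate pre 0).foldl (fun d p => PySem.Dict.insert d p.2 p.1) PySem.Dict.empty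

theorem pvIdx_append_of_mem (pre t : List Int) (x : Int) (h : x ∈ pre) :
    pvIdx (pre ++ t) x = pvIdx pre x := by
  induction pre with
  | nil => simp at h
  | cons y ys ih =>
    by_cases hy : y = x
    · simp [pvIdx, hy]
    · have h' : x ∈ ys := by
        rcases List.mem_cons.mp h with h1 | h1
        · exact absurd h1.symm hy
        · exact h1
      simp [pvIdx, hy, ih h']

theorem pvIdx_append_self (pre t : List Int) (x : Int) (h : x ∉ pre) :
    pvIdx (pre ++ x :: t) x = pre.length := by
  induction pre with
  | nil => simp [pvIdx]
  | cons y ys ih =>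
    have hy : y ≠ x := fun he => h (by simp [he])
    simp [pvIdx, hy, ih (fun hm => h (List.mem_cons_of_mem _ hm))]

theorem dictOf_append (pre : List Int) (a : Int) :
    dictOf (pre ++ [a]) = (dictOf pre).insert a (pre.length : Int) := by
  simp [dictOf, PySem.List.enumerate_append, List.foldl_append, PySem.List.enumerate]

theorem dictOf_get? (pre : List Int) (h : pre.Nodup) (x : Int) :
    (dictOf pre).get? x = if x ∈ pre then some ((pvIdx pre x : Nat) : Int) else none := by
  induction pre using List.reverseRecOn with
  | nil => simp [dictOf, PySem.List.enumerate, PySem.Dict.get?_empty]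
  | append_singleton ys a ih =>
    have h' := List.nodup_append.mp h
    have hnd : ys.Nodup := h'.1
    have ha : a ∉ ys := fun hm => (h'.2.2 a hm a (by simp)) rfl
    rw [dictOf_append]
    by_cases hx : x = a
    · subst hx
      rw [PySem.Dict.get?_insert_self]
      simp [pvIdx_append_self ys [] x ha]
    · rw [PySem.Dict.get?_insert_of_ne _ _ hx, ih hnd]
      by_cases hm : x ∈ ys
      · simp [hm, hx, pvIdx_append_of_mem ys [a] x hm]
      · simp [hm, hx]

theorem foldl_add_prefix (l s : List Int) :
    ∃ t, List.foldl PySem.Set.add s l = s ++ t := by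
  induction l generalizing s with
  | nil => exact ⟨[], by simp⟩
  | cons a l ih =>
    rcases ih (PySem.Set.add s a) with ⟨t, ht⟩
    by_cases hm : a ∈ s
    · exact ⟨t, by simpa [PySem.Set.add, hm] using ht⟩
    · exact ⟨a :: t, by simpa [PySem.Set.add, hm] using ht⟩

theorem loopA (xs : List Int) : ∀ (pre : List Int) (acc : List Int), pre.Nodup →
    xs.foldl stepA ((pre.length : Int), dictOf pre, acc)
      = (((List.foldl PySem.Set.add pre xs).length : Int),
         dictOf (List.foldl PySem.Set.add pre xs),
         acc ++ xs.map (fun x => ((pvIdx (List.foldl PySem.Set.add pre xs) x : Nat) : Int))) := by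
  induction xs with
  | nil => intro pre acc _; simp
  | cons node rest ih =>
    intro pre acc hnd
    have hcont : (dictOf pre).contains node = decide (node ∈ pre) := by
      rw [PySem.Dict.contains_eq_isSome_get?, dictOf_get? pre hnd]
      by_cases hm : node ∈ pre <;> simp [hm]
    by_cases hm : node ∈ pre
    · have hstep : stepA ((pre.length : Int), dictOf pre, acc) node
          = ((pre.length : Int), dictOf pre, acc ++ [((pvIdx pre node : Nat) : Int)]) := by
        simp [stepA, hcont, hm, PySem.Dict.getD_eq_get?_getD, dictOf_get? pre hnd]
      have hadd : PySem.Set.add pre node = pre := by simp [PySem.Set.add, hm]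
      rcases foldl_add_prefix rest pre with ⟨t, ht⟩
      have hidx : pvIdx (List.foldl PySem.Set.add pre rest) node = pvIdx pre node := by
        rw [ht]; exact pvIdx_append_of_mem pre t node hm
      simp only [List.foldl_cons, hstep, hadd, ih pre _ hnd, List.map_cons, hidx]
      simp
    · have hstep : stepA ((pre.length : Int), dictOf pre, acc) node
          = (((pre ++ [node]).length : Int), dictOf (pre ++ [node]),
             acc ++ [(pre.length : Int)]) := by
        simp [stepA, hcont, hm, dictOf_append, PySem.Dict.getD_eq_get?_getD,
          PySem.Dict.get?_insert_self]
      have hadd : PySem.Set.add pre node = pre ++ [node] := by simp [PySem.Set.add, hm]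
      have hnd' : (pre ++ [node]).Nodup := by
        simp only [List.nodup_append, List.nodup_cons]
        refine ⟨hnd, by simp, ?_⟩
        intro a ha b hb
        simp only [List.mem_singleton] at hb
        subst hb
        exact fun he => hm (he ▸ ha)
      rcases foldl_add_prefix rest (pre ++ [node]) with ⟨t, ht⟩
      have hidx : pvIdx (List.foldl PySem.Set.add (pre ++ [node]) rest) node = pre.length := by
        rw [ht, List.append_assoc]; exact pvIdx_append_self pre (t) node hm
      simp only [List.foldl_cons, hstep, hadd, ih (pre ++ [node]) _ hnd', List.map_cons, hidx]
      simp

-- B's per-element value, in decomposed form: the length of the dedup of the prefix before the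
-- first occurrence of x equals x's first-occurrence rank in the dedup of the whole list
theorem pvIdx_eq_prefix_len (p : List Int) : ∀ (s pre : List Int) (x : Int),
    x ∉ pre → x ∉ p →
    pvIdx (List.foldl PySem.Set.add pre (p ++ x :: s)) x
      = (List.foldl PySem.Set.add pre p).length := by
  induction p with
  | nil =>
    intro s pre x hpre _
    have hadd : PySem.Set.add pre x = pre ++ [x] := by simp [PySem.Set.add, hpre]
    rcases foldl_add_prefix s (pre ++ [x]) with ⟨t, ht⟩
    simp only [List.nil_append, List.foldl_cons, hadd, ht, List.foldl_nil]
    rw [pvIdx_append_of_mem (pre ++ [x]) t x (by simp)]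
    exact pvIdx_append_self pre [] x hpre
  | cons a p' ih =>
    intro s pre x hpre hp
    have hax : x ≠ a := fun he => hp (by simp [he])
    have hpre' : x ∉ PySem.Set.add pre a := by
      intro hm
      by_cases hma : a ∈ pre
      · exact hpre (by simpa [PySem.Set.add, hma] using hm)
      · rcases by simpa [PySem.Set.add, hma] using hm with h1 | h1
        · exact hpre h1
        · exact hax h1
    have hp' : x ∉ p' := fun hm => hp (List.mem_cons_of_mem _ hm)
    simpa using ih s (PySem.Set.add pre a) x hpre' hp'

theorem alt_eq (xs : List Int) :
    random_to_anonymous_walk_alt xs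
      = xs.map (fun x => ((pvIdx (PySem.List.dedup xs) x : Nat) : Int)) := by
  unfold random_to_anonymous_walk_alt
  apply List.map_congr_left
  intro x hx
  have hsome : ∃ j, PySem.List.index? xs x = some j := by
    rcases Option.isSome_iff_exists.mp ((PySem.List.index?_isSome_iff xs x).mpr hx) with ⟨j, hj⟩
    exact ⟨j, hj⟩
  rcases hsome with ⟨j, hj⟩
  rcases (PySem.List.index?_eq_some_iff xs x j).mp hj with ⟨p, s, hxs, hlen, hxp⟩
  have htake : PySem.List.slice xs none (some (j : Int)) = xs.take j :=
    PySem.List.slice_to_natCast xs j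
  have hkey : pvIdx (PySem.List.dedup xs) x = (PySem.Set.ofList (xs.take j)).length := by
    have h1 : List.take j (p ++ x :: s) = p := by
      rw [← hlen, List.take_left]
    rw [hxs, h1]
    simpa [PySem.List.dedup_eq_ofList, PySem.Set.ofList, PySem.Set.empty] using
      pvIdx_eq_prefix_len p s [] x (by simp) hxp
  simp only [hj, htake, hkey]

-- ===== VERDICT (by name: the statement is the Claim_ definition above) =====
theorem random_to_anonymous_walk_spec : Claim_equal_random_to_anonymous_walk := by
  intro xs _
  show _ = _
  have h0 : (0 : Int) = ((([] : List Int)).length : Int) := by simp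
  have hd0 : (PySem.Dict.empty : PySem.Dict Int Int) = dictOf [] := by
    simp [dictOf, PySem.List.enumerate]
  unfold random_to_anonymous_walk
  rw [h0, hd0, loopA xs [] [] (by simp), alt_eq]
  simp [PySem.List.dedup, PySem.Set.ofList, PySem.Set.empty]
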